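-- pv_equiv track=rewrite | github.com/juandarr/ProjectEuler | 32.py | n_perm_k
-- ===== SOURCE A (Python) =====
-- def n_perm_k(n,k):
--     perm = []
--     for i in range(1, n+1):
--         perm.append(str(i))
--     while (k>1):
--         tmp = []
--         for i in perm:
--             for j in range(1,n+1):
--                 if str(j) not in i:
--                     tmp.append(i+str(j))
--         k -= 1
--         perm = tmp
--     return perm
-- ===== SOURCE B (Python) =====
-- def n_perm_k(n, k):
--     L = k if k > 1 else 1
--     digits = [str(i) for i in range(1, n + 1)]
--
--     def dfs(prefix, d):
--         if d <= 1:
--             return [prefix]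
--         out = []
--         for s in digits:
--             if s not in prefix:
--                 out.extend(dfs(prefix + s, d - 1))
--         return out
--
--     res = []
--     for s in digits:
--         res.extend(dfs(s, L))
--     return res
-- ===== Notes on version B (the rewrite author's own statement) =====
-- stated objective: alternative
-- what changed: Replaces A's breadth-first rewriting of the whole candidate list k-1 times by a recursive depth-first search that extends one prefix at a time, keeping the same substring membership test and ascending digit order.
import Mathlib
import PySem

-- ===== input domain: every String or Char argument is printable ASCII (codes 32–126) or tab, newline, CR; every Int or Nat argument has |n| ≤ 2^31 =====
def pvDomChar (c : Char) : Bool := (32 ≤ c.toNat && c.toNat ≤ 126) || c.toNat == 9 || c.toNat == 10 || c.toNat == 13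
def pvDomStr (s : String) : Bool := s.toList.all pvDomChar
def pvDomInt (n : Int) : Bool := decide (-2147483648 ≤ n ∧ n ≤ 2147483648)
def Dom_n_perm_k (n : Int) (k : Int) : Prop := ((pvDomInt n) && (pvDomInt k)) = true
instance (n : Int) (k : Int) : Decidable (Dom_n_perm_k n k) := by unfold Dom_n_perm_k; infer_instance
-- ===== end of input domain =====

-- B replaces A's breadth-first round-by-round rewriting of the candidate list with a
-- recursive depth-first search over prefixes (alternative decomposition, same output).

-- ===== PORT A =====
-- one round of A's while-loop body: rebuild tmp from perm
def nPermStep (n : Int) (perm : List String) : List String :=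
  perm.foldl (fun tmp i =>
    (PySem.List.pyRange 1 (n + 1) 1).foldl (fun tmp j =>
      if !(PySem.Str.isIn (PySem.Int.toStr j) i) then tmp ++ [i ++ PySem.Int.toStr j] else tmp) tmp) []

-- A's while (k > 1) loop
def nPermLoop (n : Int) (k : Int) (perm : List String) : List String :=
  if k > 1 then nPermLoop n (k - 1) (nPermStep n perm) else perm
termination_by (k - 1).toNat
decreasing_by omega

def n_perm_k (n : Int) (k : Int) : List String :=
  nPermLoop n k
    ((PySem.List.pyRange 1 (n + 1) 1).foldl (fun perm i => perm ++ [PySem.Int.toStr i]) [])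

-- ===== PORT B =====
-- depth-first search of Source B: extend prefix while d > 1
def nPermDfs (digits : List String) (pre : String) (d : Int) : List String :=
  if d ≤ 1 then [pre]
  else digits.foldl (fun out s =>
    if !(PySem.Str.isIn s pre) then out ++ nPermDfs digits (pre ++ s) (d - 1) else out) []
termination_by (d - 1).toNat
decreasing_by omega

def n_perm_k_alt (n : Int) (k : Int) : List String :=
  let L := if k > 1 then k else 1
  let digits := (PySem.List.pyRange 1 (n + 1) 1).map PySem.Int.toStr
  digits.foldl (fun res s => res ++ nPermDfs digits s L) []

-- ===== PRECONDITION & SPEC =====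
def Spec_n_perm_k (n : Int) (k : Int) (out : List String) : Prop := out = n_perm_k_alt n k
instance (n : Int) (k : Int) (out : List String) : Decidable (Spec_n_perm_k n k out) := by unfold Spec_n_perm_k; infer_instance

-- ===== CLAIM (what is proved, stated in full; the proofs are below) =====
def Claim_equal_n_perm_k : Prop := ∀ (n : Int) (k : Int), Dom_n_perm_k n k → Spec_n_perm_k n k (n_perm_k n k)

-- ===== LEMMAS AND PROOFS =====

-- 'if c then out else out ++ X' folded: pull the accumulator out as a flatMap
theorem foldl_append_ifnot {α : Type} (c : α → Bool) (X : α → List String) :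
    ∀ (l : List α) (acc : List String),
      l.foldl (fun out s => if !(c s) then out ++ X s else out) acc
        = acc ++ l.flatMap (fun s => if !(c s) then X s else []) := by
  intro l
  induction l with
  | nil => simp
  | cons s t ih =>
      intro acc
      simp only [Bool.not_eq_true'] at ih
      cases h : c s <;> simp [List.foldl_cons, h, ih]

-- a DFS node with d > 1 is the flatMap of its children
theorem nPermDfs_gt_one (digits : List String) (pre : String) (d : Int) (hd : 1 < d) :
    nPermDfs digits pre d
      = digits.flatMap (fun s =>
          if !(PySem.Str.isIn s pre) then nPermDfs digits (pre ++ s) (d - 1) else []) := by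
  rw [nPermDfs, if_neg (by omega)]
  rw [foldl_append_ifnot (fun s => PySem.Str.isIn s pre)
      (fun s => nPermDfs digits (pre ++ s) (d - 1))]
  simp

-- one BFS round on a single string i equals the children lists of the DFS node i
theorem step_single_eq (n : Int) (i : String) (h : String → List String) :
    (((PySem.List.pyRange 1 (n + 1) 1).filter
        (fun j => !(PySem.Str.isIn (PySem.Int.toStr j) i))).map
        (fun j => i ++ PySem.Int.toStr j)).flatMap h
      = ((PySem.List.pyRange 1 (n + 1) 1).map PySem.Int.toStr).flatMap
          (fun s => if !(PySem.Str.isIn s i) then h (i ++ s) else []) := by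
  induction (PySem.List.pyRange 1 (n + 1) 1) with
  | nil => simp
  | cons j t ih =>
      simp only [List.map_cons, List.filter_cons]
      cases hj : PySem.Str.isIn (PySem.Int.toStr j) i <;> simp_all

-- A's step is a flatMap over perm
theorem nPermStep_eq (n : Int) (perm : List String) :
    nPermStep n perm
      = perm.flatMap (fun i =>
          ((PySem.List.pyRange 1 (n + 1) 1).filter
            (fun j => !(PySem.Str.isIn (PySem.Int.toStr j) i))).map
            (fun j => i ++ PySem.Int.toStr j)) := by
  unfold nPermStep
  rw [show (fun (tmp : List String) (i : String) =>
        (PySem.List.pyRange 1 (n + 1) 1).foldl (fun tmp j =>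
          if !(PySem.Str.isIn (PySem.Int.toStr j) i) then tmp ++ [i ++ PySem.Int.toStr j] else tmp) tmp)
      = (fun tmp i => tmp ++ ((PySem.List.pyRange 1 (n + 1) 1).filter
            (fun j => !(PySem.Str.isIn (PySem.Int.toStr j) i))).map
            (fun j => i ++ PySem.Int.toStr j)) from ?_]
  · rw [PySem.List.foldl_append_eq_flatMap]
    simp
  · funext tmp i
    exact PySem.List.foldl_append_if (fun j => !(PySem.Str.isIn (PySem.Int.toStr j) i))
      (fun j => i ++ PySem.Int.toStr j) _ _

-- the BFS loop run from any list equals gluing the DFS subtrees of its elements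
theorem nPermLoop_eq_flatMap_dfs (n : Int) :
    ∀ (m : Nat) (k : Int), (k - 1).toNat = m → ∀ (perm : List String),
      nPermLoop n k perm
        = perm.flatMap (fun i =>
            nPermDfs ((PySem.List.pyRange 1 (n + 1) 1).map PySem.Int.toStr) i k) := by
  intro m
  induction m with
  | zero =>
      intro k hk perm
      have hk1 : ¬ 1 < k := by omega
      rw [nPermLoop, if_neg hk1]
      have hbase : ∀ i, nPermDfs ((PySem.List.pyRange 1 (n + 1) 1).map PySem.Int.toStr) i k = [i] := by
        intro i; rw [nPermDfs, if_pos (by omega)]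
      simp [hbase]
  | succ m ih =>
      intro k hk perm
      have hk1 : 1 < k := by omega
      rw [nPermLoop, if_pos hk1, ih (k - 1) (by omega), nPermStep_eq, List.flatMap_assoc]
      refine List.flatMap_congr (fun i _ => ?_)
      rw [nPermDfs_gt_one _ _ _ hk1]
      exact step_single_eq n i _

-- ===== VERDICT (by name: the statement is the Claim_ definition above) =====
theorem n_perm_k_spec : Claim_equal_n_perm_k := by
  intro n k _
  unfold Spec_n_perm_k n_perm_k n_perm_k_alt
  rw [PySem.List.foldl_append_singleton_eq_map, List.nil_append,
      nPermLoop_eq_flatMap_dfs n (k - 1).toNat k rfl,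
      PySem.List.foldl_append_eq_flatMap, List.nil_append]
  by_cases hk : 1 < k
  · simp only [if_pos hk]
  · simp only [if_neg hk]
    refine List.flatMap_congr (fun i _ => ?_)
    rw [nPermDfs, if_pos (by omega), nPermDfs, if_pos (by omega)]
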